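-- pv_equiv track=rewrite | github.com/nOOne-is-hier/TIS | Baekjoon/3687.성냥개비/3687.성냥개비8.py | find_min_case_greedy
-- ===== SOURCE A (Python) =====
-- def find_min_case_greedy(n):
--     low = ''
--     low_case = ['0', '0', '1', '7', '4', '2', '6']
--     if n < 7:
--         low = low_case[n]
--     else:
--         a = n // 7
--         b = n % 7
--         for _ in range(a):
--             low += '8'
--         if 0 < b <= 2:
--             for i in range(2 - b):
--                 low = '0' + low[:-1]
--             low = '1' + low
--         elif 2 < b < 6:
--             for i in range(5 - b):
--                 low = '0' + low[:-1]
--             if (5 - b) > len(low):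
--                 low = low[:-1] + low_case[6 - ((5 - b) - len(low))]
--             low = '2' + low
--         elif b == 6:
--             low = '6' + low
--     return low
-- ===== SOURCE B (Python) =====
-- def find_min_case_greedy(n):
--     if n < 2:
--         raise ValueError("too few matchsticks to form any digit")
--     if n < 7:
--         return ['1', '7', '4', '2', '6'][n - 2]
--     a, b = divmod(n, 7)
--     if b == 3 and a == 1:
--         return '22'
--     heads = ['', '10', '1', '200', '20', '2', '6']
--     used = [0, 1, 0, 2, 1, 0, 0]
--     return heads[b] + '8' * (a - used[b])
-- ===== Notes on version B (the rewrite author's own statement) =====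
-- stated objective: simpler
-- what changed: Replaces A's per-matchstick '8'-appending loop and repeated '0'-prefix/last-char-truncation patch loops with a direct closed form: a remainder-indexed head-string table plus a single '8'*(n//7 - used) repetition.
-- outside the precondition, e.g. on find_min_case_greedy(1): A returns '0', B raises ValueError; on find_min_case_greedy(0): A returns '0', B raises ValueError; on find_min_case_greedy(-3): A returns '4', B raises ValueError
import Mathlib
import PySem

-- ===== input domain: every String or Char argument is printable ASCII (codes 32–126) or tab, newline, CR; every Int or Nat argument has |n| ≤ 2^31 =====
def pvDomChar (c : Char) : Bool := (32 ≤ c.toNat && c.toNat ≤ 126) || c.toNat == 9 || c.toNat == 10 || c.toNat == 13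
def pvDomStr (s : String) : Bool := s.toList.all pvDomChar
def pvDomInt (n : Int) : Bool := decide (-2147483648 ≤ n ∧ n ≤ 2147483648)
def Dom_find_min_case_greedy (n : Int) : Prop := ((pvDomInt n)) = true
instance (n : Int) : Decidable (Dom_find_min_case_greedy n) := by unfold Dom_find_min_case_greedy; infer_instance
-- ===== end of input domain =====

-- B replaces A's per-matchstick loops and prefix-patching with a remainder-indexed closed-form table (simpler); outside Pre_ (n ≤ 1) B raises where A returns accidental table values or raises.


-- ===== PORT A =====
-- literal port of A; strings are handled as List Char via PySem.Chars/List primitives (exact)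
def find_min_case_greedy (n : Int) : String :=
  let low_case : List (List Char) := [['0'], ['0'], ['1'], ['7'], ['4'], ['2'], ['6']]
  if n < 7 then
    -- low = low_case[n]  (pyGet? = none is Python's IndexError, excluded by Pre_)
    String.ofList ((PySem.List.pyGet? low_case n).getD [])
  else
    let a := PySem.Int.floordiv n 7
    let b := PySem.Int.mod n 7
    -- for _ in range(a): low += '8'
    let low := (PySem.List.pyRange 0 a 1).foldl (fun low _ => low ++ ['8']) []
    if 0 < b ∧ b ≤ 2 then
      -- for i in range(2 - b): low = '0' + low[:-1]
      let low := (PySem.List.pyRange 0 (2 - b) 1).foldl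
        (fun low _ => ['0'] ++ PySem.List.slice low none (some (-1))) low
      String.ofList (['1'] ++ low)
    else if 2 < b ∧ b < 6 then
      -- for i in range(5 - b): low = '0' + low[:-1]
      let low := (PySem.List.pyRange 0 (5 - b) 1).foldl
        (fun low _ => ['0'] ++ PySem.List.slice low none (some (-1))) low
      let low :=
        if (5 - b) > (low.length : Int) then
          PySem.List.slice low none (some (-1)) ++
            (PySem.List.pyGet? low_case (6 - ((5 - b) - (low.length : Int)))).getD []
        else low
      String.ofList (['2'] ++ low)
    else if b = 6 then
      String.ofList (['6'] ++ low)
    else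
      String.ofList low

-- ===== PORT B =====
-- literal port of B (Source B): closed-form table indexed by n % 7
def find_min_case_greedy_alt (n : Int) : String :=
  if n < 2 then ""   -- B raises ValueError here; these inputs are outside Pre_
  else if n < 7 then
    String.ofList ((PySem.List.pyGet? [['1'], ['7'], ['4'], ['2'], ['6']] (n - 2)).getD [])
  else
    let a := PySem.Int.floordiv n 7
    let b := PySem.Int.mod n 7
    if b = 3 ∧ a = 1 then "22"
    else
      let heads : List (List Char) := [[], ['1','0'], ['1'], ['2','0','0'], ['2','0'], ['2'], ['6']]
      let used : List Int := [0, 1, 0, 2, 1, 0, 0]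
      String.ofList ((PySem.List.pyGet? heads b).getD [] ++
        PySem.List.pyRepeat ['8'] (a - (PySem.List.pyGet? used b).getD 0))

-- ===== PRECONDITION & SPEC =====
-- Pre_ excludes n ≤ 1, where too few matchsticks remain to form any digit: A's values there
-- (a sentinel '0' for the smallest non-negative inputs and negative-index wraparound table values
-- for small negative inputs, IndexError below the table) are accidents of its lookup table,
-- and B raises ValueError on all of them.
def Pre_find_min_case_greedy (n : Int) : Prop := 2 ≤ n
instance (n : Int) : Decidable (Pre_find_min_case_greedy n) := by unfold Pre_find_min_case_greedy; infer_instance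
def pvWitness_find_min_case_greedy : Int := (9)

def Spec_find_min_case_greedy (n : Int) (out : String) : Prop := out = find_min_case_greedy_alt n
instance (n : Int) (out : String) : Decidable (Spec_find_min_case_greedy n out) := by unfold Spec_find_min_case_greedy; infer_instance

-- ===== CLAIM (what is proved, stated in full; the proofs are below) =====
def Claim_equal_find_min_case_greedy : Prop := ∀ (n : Int), Dom_find_min_case_greedy n → Pre_find_min_case_greedy n → Spec_find_min_case_greedy n (find_min_case_greedy n)

-- ===== LEMMAS AND PROOFS =====


-- the '8'-appending loop over range(a) builds a run of a eights
theorem eights_fold (m : Nat) :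
    (PySem.List.pyRange 0 (m : Int) 1).foldl (fun low _ => low ++ ['8']) [] = List.replicate m '8' := by
  rw [PySem.List.pyRange_zero_natCast, PySem.List.foldl_append_singleton_eq_map]
  simp [Function.comp_def, List.map_const']

theorem find_min_case_greedy_main (n : Int) (h2 : 2 ≤ n) :
    find_min_case_greedy n = find_min_case_greedy_alt n := by
  by_cases h7 : n < 7
  · have h : n = 2 ∨ n = 3 ∨ n = 4 ∨ n = 5 ∨ n = 6 := by omega
    rcases h with h|h|h|h|h <;> subst h <;> decide
  · rw [not_lt] at h7
    unfold find_min_case_greedy find_min_case_greedy_alt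
    rw [if_neg (by omega : ¬ n < 7), if_neg (by omega : ¬ n < 2), if_neg (by omega : ¬ n < 7)]
    simp only [PySem.Int.floordiv_eq_ediv_of_pos (by norm_num : (0:Int) < 7),
               PySem.Int.mod_eq_emod_of_pos (by norm_num : (0:Int) < 7)]
    obtain ⟨m, hm⟩ : ∃ m : Nat, n / 7 = (m : Int) := ⟨(n / 7).toNat, by omega⟩
    have hm1 : 1 ≤ m := by omega
    rw [hm]
    obtain ⟨r, hr0, hr7, hrr⟩ : ∃ r : Int, 0 ≤ r ∧ r < 7 ∧ n % 7 = r := ⟨n % 7, by omega, by omega, rfl⟩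
    rw [hrr, eights_fold m]
    interval_cases r
    · -- b = 0
      rw [if_neg (by norm_num), if_neg (by norm_num), if_neg (by norm_num), if_neg (by norm_num)]
      have h0 : ((m : Int) - 0).toNat = m := by omega
      simp [PySem.List.pyGet?, PySem.List.pyIdx?, PySem.List.pyRepeat_singleton]
    · -- b = 1
      rw [if_pos (by norm_num), if_neg (by norm_num)]
      have e1 : PySem.List.pyRange 0 1 = [0] := by decide
      have h1 : ((m : Int) - 1).toNat = m - 1 := by omega
      simp [e1, PySem.List.slice_to_neg_one, List.dropLast_replicate,
            PySem.List.pyGet?, PySem.List.pyIdx?, PySem.List.pyRepeat_singleton, h1]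
    · -- b = 2
      rw [if_pos (by norm_num), if_neg (by norm_num)]
      have e2 : PySem.List.pyRange 0 0 = [] := by decide
      simp [e2, PySem.List.pyGet?, PySem.List.pyIdx?, PySem.List.pyRepeat_singleton]
    · -- b = 3
      rcases Nat.lt_or_ge m 2 with hsm | hsm
      · have : m = 1 := by omega
        subst this
        decide
      · obtain ⟨k, rfl⟩ : ∃ k, m = k + 2 := ⟨m - 2, by omega⟩
        rw [if_neg (by norm_num), if_pos (by norm_num)]
        have e3 : PySem.List.pyRange 0 (5 - 3) = [0, 1] := by decide
        have hlow : List.foldl (fun low _ => ['0'] ++ PySem.List.slice low none (some (-1)))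
            (List.replicate (k + 2) '8') (PySem.List.pyRange 0 (5 - 3)) =
            '0' :: '0' :: List.replicate k '8' := by
          rw [e3]
          simp [List.foldl, PySem.List.slice_to_neg_one,
                List.replicate_succ, List.dropLast_cons_of_ne_nil]
        rw [hlow]
        rw [if_neg (by push_cast [List.length_cons, List.length_replicate]; omega), if_neg (by push_cast; omega)]
        simp [PySem.List.pyGet?, PySem.List.pyIdx?, PySem.List.pyRepeat_singleton]
    · -- b = 4
      rw [if_neg (by norm_num), if_pos (by norm_num)]
      have e4 : PySem.List.pyRange 0 (5 - 4) = [0] := by decide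
      have hlow : List.foldl (fun low _ => ['0'] ++ PySem.List.slice low none (some (-1)))
          (List.replicate m '8') (PySem.List.pyRange 0 (5 - 4)) =
          '0' :: List.replicate (m - 1) '8' := by
        rw [e4]
        simp [List.foldl, PySem.List.slice_to_neg_one, List.dropLast_replicate]
      rw [hlow]
      rw [if_neg (by push_cast [List.length_cons, List.length_replicate]; omega), if_neg (by norm_num)]
      have h1 : ((m : Int) - 1).toNat = m - 1 := by omega
      simp [PySem.List.pyGet?, PySem.List.pyIdx?, PySem.List.pyRepeat_singleton, h1]
    · -- b = 5
      rw [if_neg (by norm_num), if_pos (by norm_num)]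
      have e5 : PySem.List.pyRange 0 (5 - 5) = [] := by decide
      rw [e5]
      simp only [List.foldl]
      rw [if_neg (by push_cast [List.length_cons, List.length_replicate]; omega), if_neg (by norm_num)]
      simp [PySem.List.pyGet?, PySem.List.pyIdx?, PySem.List.pyRepeat_singleton]
    · -- b = 6
      rw [if_neg (by norm_num), if_neg (by norm_num), if_pos rfl, if_neg (by norm_num)]
      simp [PySem.List.pyGet?, PySem.List.pyIdx?, PySem.List.pyRepeat_singleton]

-- ===== VERDICT (by name: the statement is the Claim_ definition above) =====
theorem find_min_case_greedy_spec : Claim_equal_find_min_case_greedy := by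
  intro n _ hpre
  unfold Spec_find_min_case_greedy
  exact find_min_case_greedy_main n hpre
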